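-- pv_equiv track=rewrite | github.com/1tsova/pilo_lab4 | PILO_lab4.py | isConst
-- ===== SOURCE A (Python) =====
-- def isConst(s):
--     numb = '0123456789.'
--     if s.count('.')>1:
--         return False
--     for i in range (len(s)):
--         if s[i] not in numb:
--             return False
--     return True
-- ===== SOURCE B (Python) =====
-- def isConst(s):
--     residue = [ch for ch in s if ch not in '0123456789']
--     return residue == [] or residue == ['.']
-- ===== Notes on version B (the rewrite author's own statement) =====
-- stated objective: alternative
-- what changed: Instead of counting dots and scanning each character against an allowed set, B filters out all digit characters in one comprehension and accepts iff the residue list is empty or exactly ['.'] - no dot counting and no per-character reject loop.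
import Mathlib
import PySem

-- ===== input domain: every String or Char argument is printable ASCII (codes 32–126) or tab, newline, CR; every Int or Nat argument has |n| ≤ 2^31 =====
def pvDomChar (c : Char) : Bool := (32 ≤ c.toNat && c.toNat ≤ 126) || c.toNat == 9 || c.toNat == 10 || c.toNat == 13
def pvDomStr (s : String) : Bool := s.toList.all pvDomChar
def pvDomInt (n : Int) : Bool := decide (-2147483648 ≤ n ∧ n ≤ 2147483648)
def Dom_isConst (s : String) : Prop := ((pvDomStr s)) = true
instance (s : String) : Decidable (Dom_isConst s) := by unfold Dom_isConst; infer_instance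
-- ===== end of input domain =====

-- B drops A's dot count and per-character reject loop: it filters out the digits and
-- accepts iff the residue is [] or ['.']; same O(n) cost ("alternative").

-- ===== PORT A =====
-- 'for i in range(len(s)): if s[i] not in numb: return False' as structural recursion over the chars
def isConstLoopA : List Char → List Char → Bool
  | [], _ => true
  | c :: t, numb => if PySem.Chars.isIn [c] numb then isConstLoopA t numb else false

def isConst (s : String) : Bool :=
  let numb := "0123456789."
  if PySem.Str.count s "." > 1 then false
  else isConstLoopA s.toList numb.toList

-- ===== PORT B =====
-- residue = [ch for ch in s if ch not in '0123456789']
def isConst_alt (s : String) : Bool :=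
  let residue := s.toList.filter (fun c => !(PySem.Chars.isIn [c] "0123456789".toList))
  residue == ([] : List Char) || residue == ['.']

-- ===== PRECONDITION & SPEC =====
def Spec_isConst (s : String) (out : Bool) : Prop := out = isConst_alt s
instance (s : String) (out : Bool) : Decidable (Spec_isConst s out) := by unfold Spec_isConst; infer_instance

-- ===== CLAIM (what is proved, stated in full; the proofs are below) =====
def Claim_equal_isConst : Prop := ∀ (s : String), Dom_isConst s → Spec_isConst s (isConst s)

-- ===== LEMMAS AND PROOFS =====

-- 'c in numb' for a single character is membership
theorem isIn_singleton (c : Char) (l : List Char) :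
    PySem.Chars.isIn [c] l = l.contains c := by
  by_cases h : c ∈ l
  · simp [(PySem.Chars.isIn_iff_infix [c] l).mpr ((List.singleton_infix_iff c l).mpr h), h]
  · simp [(PySem.Chars.isIn_eq_false_iff [c] l).mpr (fun hi => h ((List.singleton_infix_iff c l).mp hi)), h]

theorem loopA_eq_all (l numb : List Char) :
    isConstLoopA l numb = l.all (fun c => numb.contains c) := by
  induction l with
  | nil => rfl
  | cons c t ih => simp [isConstLoopA, isIn_singleton, ih]

theorem count_go_dot (l : List Char) : ∀ (fuel acc : Nat), l.length ≤ fuel →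
    PySem.Chars.count.go ['.'] fuel l acc = acc + l.count '.' := by
  induction l with
  | nil => intro fuel acc _; cases fuel <;> simp [PySem.Chars.count.go]
  | cons c t ih =>
    intro fuel acc h
    cases fuel with
    | zero => simp at h
    | succ n =>
      by_cases hc : c = '.'
      · subst hc
        rw [show PySem.Chars.count.go ['.'] (n+1) ('.' :: t) acc
              = PySem.Chars.count.go ['.'] n t (acc + 1) by
            simp [PySem.Chars.count.go, List.isPrefixOf]]
        rw [ih n (acc + 1) (by simpa using h)]
        simp
        omega
      · have hpre : (['.'].isPrefixOf (c :: t)) = false := by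
          simp [List.isPrefixOf]; exact fun h => hc h.symm
        have step : PySem.Chars.count.go ['.'] (n+1) (c :: t) acc
              = PySem.Chars.count.go ['.'] n t acc := by
          simp [PySem.Chars.count.go, hpre]
        rw [step]
        rw [ih n acc (by simpa using h)]
        simp [hc]

theorem count_dot (l : List Char) : PySem.Chars.count l ['.'] = l.count '.' := by
  rw [PySem.Chars.count]
  simp only [List.isEmpty_cons, if_false, Bool.false_eq_true]
  simpa using count_go_dot l l.length 0 (le_refl _)

-- A's allowed set is the digits plus the dot
theorem numb_contains (c : Char) :
    ("0123456789.".toList).contains c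
      = (("0123456789".toList).contains c || (c == '.')) := by
  rw [Bool.eq_iff_iff]
  simp [List.contains_eq_mem]
  tauto

-- the residue of B (digits stripped) characterises A's per-character scan
theorem all_numb_eq_residue (l : List Char) :
    l.all (fun c => ("0123456789.".toList).contains c)
      = (l.filter (fun c => !(("0123456789".toList).contains c))).all (fun c => c = '.') := by
  induction l with
  | nil => rfl
  | cons c t ih =>
    rw [List.all_cons, List.filter_cons, numb_contains]
    cases hd : ("0123456789".toList).contains c
    · rw [if_pos (show (!false) = true from rfl), List.all_cons, ← ih, Bool.false_or]
      congr 1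
    · rw [if_neg (show ¬(!true) = true by simp), Bool.true_or, Bool.true_and, ih]

-- dots survive the digit filter, so the counts coincide
theorem count_dot_residue (l : List Char) :
    (l.filter (fun c => !(("0123456789".toList).contains c))).count '.' = l.count '.' := by
  induction l with
  | nil => rfl
  | cons c t ih =>
    rw [List.filter_cons]
    by_cases hc : c = '.'
    · subst hc
      rw [if_pos (by decide)]
      simp
    · cases hd : ("0123456789".toList).contains c
      · rw [if_pos (show (!false) = true from rfl)]
        simp [hc]
      · rw [if_neg (show ¬(!true) = true by simp)]
        simp [hc]

theorem all_dot_count (r : List Char) (h : r.all (fun c => c = '.') = true) :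
    r.count '.' = r.length := by
  induction r with
  | nil => rfl
  | cons c t ih =>
    simp only [List.all_cons, Bool.and_eq_true, decide_eq_true_eq] at h
    simp [h.1, ih h.2]

-- the whole equivalence, over the character list
theorem isConst_main (l : List Char) :
    (if l.count '.' > 1 then false else l.all (fun c => ("0123456789.".toList).contains c))
      = ((l.filter (fun c => !(("0123456789".toList).contains c))) == ([] : List Char)
         || (l.filter (fun c => !(("0123456789".toList).contains c))) == ['.']) := by
  set r := l.filter (fun c => !(("0123456789".toList).contains c)) with hr
  have hcntr : r.count '.' = l.count '.' := by rw [hr]; exact count_dot_residue l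
  have hres := all_numb_eq_residue l
  rw [← hr] at hres
  clear_value r
  by_cases hall : l.all (fun c => ("0123456789.".toList).contains c)
  · have hrd : r.all (fun c => c = '.') = true := by rw [← hres]; exact hall
    have hcnt : l.count '.' = r.length := by rw [← hcntr, all_dot_count r hrd]
    by_cases hgt : l.count '.' > 1
    · rw [if_pos hgt]
      have hlen : r.length > 1 := hcnt ▸ hgt
      match r, hlen with
      | c1 :: c2 :: t, _ => simp
    · rw [if_neg hgt, hall]
      have hlen : r.length ≤ 1 := by omega
      match r, hrd, hlen with
      | [], _, _ => rfl
      | [c], hrd, _ =>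
        simp only [List.all_cons, List.all_nil, Bool.and_true, decide_eq_true_eq] at hrd
        simp [hrd]
  · have hrd : r.all (fun c => c = '.') = false := by rw [← hres]; simpa using hall
    have hrhs : (r == ([] : List Char) || r == ['.']) = false := by
      match r, hrd with
      | c :: t, h =>
        simp only [List.all_cons, Bool.and_eq_false_iff, decide_eq_false_iff_not] at h
        have h2 : (c :: t == ['.']) = false := by
          apply beq_eq_false_iff_ne.mpr
          intro hx
          injection hx with h1 ht
          rcases h with h | h
          · exact h h1
          · subst ht; simp at h
        rw [h2, Bool.or_false]
        rfl
    rw [hrhs]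
    split
    · rfl
    · simpa using hall

-- ===== VERDICT (by name: the statement is the Claim_ definition above) =====
theorem isConst_spec : Claim_equal_isConst := by
  intro s _
  unfold Spec_isConst isConst isConst_alt
  simp only [PySem.Str.count_eq, loopA_eq_all, isIn_singleton]
  rw [show PySem.Chars.count s.toList ".".toList = s.toList.count '.' from count_dot s.toList]
  exact isConst_main s.toList
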